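-- pv_equiv track=rewrite | github.com/wyp1125/NGS_Pipeline_Utilities | src/file_comparator/vcfdiffx.py | complex_compare
-- ===== SOURCE A (Python) =====
-- import collections
--
-- def complex_compare(x, y):
--     d1=collections.Counter(x)
--     d2=collections.Counter(y)
--     d1_keys = set(d1.keys())
--     d2_keys = set(d2.keys())
--     intersect_keys = d1_keys.intersection(d2_keys)
--     added = {o : d2[o] for o in (d2_keys - d1_keys)}
--     removed = {o : d1[o] for o in (d1_keys - d2_keys)}
--     modified = {o : (d1[o], d2[o]) for o in intersect_keys if d1[o] != d2[o]}
--     same = {o : d1[o] for o in intersect_keys if d1[o] == d2[o]}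
--     return added, removed, modified, same
-- ===== SOURCE B (Python) =====
-- def complex_compare(x, y):
--     # One merged pair-count dict (key -> (count in x, count in y)); no Counters, no set algebra.
--     counts = {}
--     for o in x:
--         cx, cy = counts.get(o, (0, 0))
--         counts[o] = (cx + 1, cy)
--     for o in y:
--         cx, cy = counts.get(o, (0, 0))
--         counts[o] = (cx, cy + 1)
--     added, removed, modified, same = {}, {}, {}, {}
--     for o, (cx, cy) in counts.items():
--         if cy == 0:
--             removed[o] = cx
--         elif cx == 0:
--             added[o] = cy
--         elif cx != cy:
--             modified[o] = (cx, cy)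
--         else:
--             same[o] = cx
--     return added, removed, modified, same
-- ===== Notes on version B (the rewrite author's own statement) =====
-- stated objective: alternative
-- what changed: Replaces the two Counters plus explicit set-difference/intersection computations by a single merged dict mapping each element to its pair of occurrence counts (built by two counting passes), classified by zero/equality tests on the count pairs instead of set membership.
import Mathlib
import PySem

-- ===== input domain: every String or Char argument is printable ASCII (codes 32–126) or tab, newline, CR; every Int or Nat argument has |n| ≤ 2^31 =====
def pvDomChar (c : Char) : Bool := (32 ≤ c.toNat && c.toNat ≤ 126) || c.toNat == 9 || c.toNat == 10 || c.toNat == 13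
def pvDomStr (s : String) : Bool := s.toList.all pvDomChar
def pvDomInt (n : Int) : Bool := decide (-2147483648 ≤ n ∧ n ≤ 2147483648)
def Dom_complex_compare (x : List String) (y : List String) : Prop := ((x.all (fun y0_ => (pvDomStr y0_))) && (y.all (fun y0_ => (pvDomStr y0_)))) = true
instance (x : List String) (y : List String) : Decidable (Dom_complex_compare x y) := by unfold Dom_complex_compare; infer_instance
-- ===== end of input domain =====

-- B replaces A's two Counters + set-difference/intersection algebra by a single merged dict
-- mapping each element to its pair of occurrence counts, classified by zero/equality tests;
-- objective: alternative (same asymptotic cost).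

-- ===== PORT A =====
-- Dict comprehensions over lists of distinct keys are ported as .map over the key list.
def complex_compare (x : List String) (y : List String) : (List (String × Int)) × (List (String × Int)) × (List (String × Int × Int)) × (List (String × Int)) :=
  let d1 := PySem.Dict.counter x
  let d2 := PySem.Dict.counter y
  let d1_keys := PySem.Set.ofList d1.keys
  let d2_keys := PySem.Set.ofList d2.keys
  let intersect_keys := PySem.Set.inter d1_keys d2_keys
  let added := (PySem.Set.diff d2_keys d1_keys).map (fun o => (o, d2.getD o 0))
  let removed := (PySem.Set.diff d1_keys d2_keys).map (fun o => (o, d1.getD o 0))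
  let modified := (intersect_keys.filter (fun o => !(d1.getD o 0 == d2.getD o 0))).map (fun o => (o, d1.getD o 0, d2.getD o 0))
  let same := (intersect_keys.filter (fun o => d1.getD o 0 == d2.getD o 0)).map (fun o => (o, d1.getD o 0))
  (added, removed, modified, same)

-- ===== PORT B =====
-- the classification loop body: one (key, (cx, cy)) item into one of the four accumulating dicts
def ccStep (acc : (List (String × Int)) × (List (String × Int)) × (List (String × Int × Int)) × (List (String × Int)))
    (p : String × Int × Int) : (List (String × Int)) × (List (String × Int)) × (List (String × Int × Int)) × (List (String × Int)) :=
  if p.2.2 == 0 then (acc.1, acc.2.1 ++ [(p.1, p.2.1)], acc.2.2.1, acc.2.2.2)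
  else if p.2.1 == 0 then (acc.1 ++ [(p.1, p.2.2)], acc.2.1, acc.2.2.1, acc.2.2.2)
  else if !(p.2.1 == p.2.2) then (acc.1, acc.2.1, acc.2.2.1 ++ [(p.1, p.2.1, p.2.2)], acc.2.2.2)
  else (acc.1, acc.2.1, acc.2.2.1, acc.2.2.2 ++ [(p.1, p.2.1)])

def complex_compare_alt (x : List String) (y : List String) : (List (String × Int)) × (List (String × Int)) × (List (String × Int × Int)) × (List (String × Int)) :=
  -- counts[o] = (occurrences in x, occurrences in y), built by two counting passes
  let counts0 : PySem.Dict String (Int × Int) :=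
    x.foldl (fun d o => d.insert o ((d.getD o (0, 0)).1 + 1, (d.getD o (0, 0)).2)) PySem.Dict.empty
  let counts :=
    y.foldl (fun d o => d.insert o ((d.getD o (0, 0)).1, (d.getD o (0, 0)).2 + 1)) counts0
  counts.items.foldl ccStep ([], [], [], [])

-- ===== PRECONDITION & SPEC =====
def Spec_complex_compare (x : List String) (y : List String) (out : (List (String × Int)) × (List (String × Int)) × (List (String × Int × Int)) × (List (String × Int))) : Prop := out = complex_compare_alt x y
instance (x : List String) (y : List String) (out : (List (String × Int)) × (List (String × Int)) × (List (String × Int × Int)) × (List (String × Int))) : Decidable (Spec_complex_compare x y out) := by unfold Spec_complex_compare; infer_instance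

-- ===== CLAIM (what is proved, stated in full; the proofs are below) =====
def Claim_equal_complex_compare : Prop := ∀ (x : List String) (y : List String), Dom_complex_compare x y → Spec_complex_compare x y (complex_compare x y)

-- ===== LEMMAS AND PROOFS =====

-- B's classification loop computes four filtered maps of its item list
theorem ccLoop_spec (u : List (String × Int × Int))
    (a : List (String × Int)) (r : List (String × Int)) (m : List (String × Int × Int)) (s : List (String × Int)) :
    u.foldl ccStep (a, r, m, s) =
      (a ++ (u.filter (fun p => !(p.2.2 == 0) && (p.2.1 == 0))).map (fun p => (p.1, p.2.2)),
       r ++ (u.filter (fun p => p.2.2 == 0)).map (fun p => (p.1, p.2.1)),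
       m ++ (u.filter (fun p => !(p.2.2 == 0) && !(p.2.1 == 0) && !(p.2.1 == p.2.2))).map (fun p => (p.1, p.2.1, p.2.2)),
       s ++ (u.filter (fun p => !(p.2.2 == 0) && !(p.2.1 == 0) && (p.2.1 == p.2.2))).map (fun p => (p.1, p.2.1))) := by
  induction u generalizing a r m s with
  | nil => simp
  | cons p rest ih =>
      simp only [List.foldl_cons, List.filter_cons]
      cases hy : (p.2.2 == 0) <;> cases hx : (p.2.1 == 0) <;>
        cases hv : (p.2.1 == p.2.2) <;>
          simp [ccStep, hy, hx, hv, ih]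

-- the first counting pass: fst accumulates l.count, snd untouched
theorem getD_foldFst (l : List String) (d : PySem.Dict String (Int × Int)) (v : String) :
    (l.foldl (fun d o => d.insert o ((d.getD o (0, 0)).1 + 1, (d.getD o (0, 0)).2)) d).getD v (0, 0)
      = ((d.getD v (0, 0)).1 + l.count v, (d.getD v (0, 0)).2) := by
  induction l generalizing d with
  | nil => simp
  | cons o rest ih =>
      simp only [List.foldl_cons, ih, PySem.Dict.getD_insert, List.count_cons]
      by_cases h : v = o
      · subst h; simp; omega
      · simp [h, Ne.symm h]

-- the second counting pass: snd accumulates l.count, fst untouched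
theorem getD_foldSnd (l : List String) (d : PySem.Dict String (Int × Int)) (v : String) :
    (l.foldl (fun d o => d.insert o ((d.getD o (0, 0)).1, (d.getD o (0, 0)).2 + 1)) d).getD v (0, 0)
      = ((d.getD v (0, 0)).1, (d.getD v (0, 0)).2 + l.count v) := by
  induction l generalizing d with
  | nil => simp
  | cons o rest ih =>
      simp only [List.foldl_cons, ih, PySem.Dict.getD_insert, List.count_cons]
      by_cases h : v = o
      · subst h; simp; omega
      · simp [h, Ne.symm h]

-- A's d2_keys - d1_keys, as a filter of the merged key list
theorem diff21_eq (k1 k2 : List String) (hk1 : k1.Nodup) (hk2 : k2.Nodup) :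
    PySem.Set.diff (PySem.Set.ofList k2) (PySem.Set.ofList k1)
      = (PySem.Set.update k1 k2).filter (fun o => decide (o ∈ k2) && !decide (o ∈ k1)) := by
  rw [PySem.Set.update_eq_append_filter, PySem.Set.ofList_eq_self_of_nodup _ hk1,
      PySem.Set.ofList_eq_self_of_nodup _ hk2, List.filter_append]
  show k2.filter (fun a => !(k1.contains a)) = _
  simp only [PySem.Set.contains_eq_listContains, List.contains_eq_mem]
  have a1 : k1.filter (fun o => decide (o ∈ k2) && !decide (o ∈ k1)) = [] :=
    List.filter_eq_nil_iff.mpr (fun o ho => by simp [ho])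
  have a2 : (k2.filter (fun y => !decide (y ∈ k1))).filter (fun o => decide (o ∈ k2) && !decide (o ∈ k1))
      = k2.filter (fun y => !decide (y ∈ k1)) :=
    List.filter_eq_self.mpr (fun o ho => by
      have hm := List.mem_filter.mp ho
      simp only [Bool.not_eq_true', decide_eq_false_iff_not] at hm
      simp [hm.1, hm.2])
  rw [a1, a2, List.nil_append]

-- A's d1_keys - d2_keys, as a filter of the merged key list
theorem diff12_eq (k1 k2 : List String) (hk1 : k1.Nodup) (hk2 : k2.Nodup) :
    PySem.Set.diff (PySem.Set.ofList k1) (PySem.Set.ofList k2)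
      = (PySem.Set.update k1 k2).filter (fun o => !decide (o ∈ k2)) := by
  rw [PySem.Set.update_eq_append_filter, PySem.Set.ofList_eq_self_of_nodup _ hk1,
      PySem.Set.ofList_eq_self_of_nodup _ hk2, List.filter_append]
  show k1.filter (fun a => !(k2.contains a)) = _
  simp only [PySem.Set.contains_eq_listContains, List.contains_eq_mem]
  have a2 : (k2.filter (fun y => !decide (y ∈ k1))).filter (fun o => !decide (o ∈ k2)) = [] :=
    List.filter_eq_nil_iff.mpr (fun o ho => by simp [(List.mem_filter.mp ho).1])
  rw [a2, List.append_nil]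

-- A's filtered intersection, as a filter of the merged key list
theorem inter_eq (k1 k2 : List String) (hk1 : k1.Nodup) (hk2 : k2.Nodup) (b : String → Bool) :
    (PySem.Set.inter (PySem.Set.ofList k1) (PySem.Set.ofList k2)).filter b
      = (PySem.Set.update k1 k2).filter (fun o => decide (o ∈ k2) && decide (o ∈ k1) && b o) := by
  rw [PySem.Set.update_eq_append_filter, PySem.Set.ofList_eq_self_of_nodup _ hk1,
      PySem.Set.ofList_eq_self_of_nodup _ hk2, List.filter_append]
  show (k1.filter (fun a => k2.contains a)).filter b = _
  simp only [PySem.Set.contains_eq_listContains, List.contains_eq_mem]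
  rw [List.filter_filter]
  have a1 : k1.filter (fun o => decide (o ∈ k2) && decide (o ∈ k1) && b o)
      = k1.filter (fun a => b a && decide (a ∈ k2)) :=
    List.filter_congr (fun o ho => by simp [ho, Bool.and_comm])
  have a2 : (k2.filter (fun y => !decide (y ∈ k1))).filter
      (fun o => decide (o ∈ k2) && decide (o ∈ k1) && b o) = [] :=
    List.filter_eq_nil_iff.mpr (fun o ho => by
      have hm := List.mem_filter.mp ho
      simp only [Bool.not_eq_true', decide_eq_false_iff_not] at hm
      simp [hm.2])
  rw [a1, a2, List.append_nil]

theorem alt_eq (x y : List String) :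
    complex_compare_alt x y =
      ((((PySem.Set.update (PySem.Set.ofList x) y).filter (fun o => !((y.count o : Int) == 0) && ((x.count o : Int) == 0))).map (fun o => (o, (y.count o : Int)))),
       (((PySem.Set.update (PySem.Set.ofList x) y).filter (fun o => ((y.count o : Int) == 0))).map (fun o => (o, (x.count o : Int)))),
       (((PySem.Set.update (PySem.Set.ofList x) y).filter (fun o => !((y.count o : Int) == 0) && !((x.count o : Int) == 0) && !((x.count o : Int) == (y.count o : Int)))).map (fun o => (o, (x.count o : Int), (y.count o : Int)))),
       (((PySem.Set.update (PySem.Set.ofList x) y).filter (fun o => !((y.count o : Int) == 0) && !((x.count o : Int) == 0) && ((x.count o : Int) == (y.count o : Int)))).map (fun o => (o, (x.count o : Int))))) := by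
  unfold complex_compare_alt
  simp only []
  have hnd : ((y.foldl (fun d o => d.insert o ((d.getD o (0, 0)).1, (d.getD o (0, 0)).2 + 1))
      (x.foldl (fun d o => d.insert o ((d.getD o (0, 0)).1 + 1, (d.getD o (0, 0)).2)) PySem.Dict.empty)) : PySem.Dict String (Int × Int)).keys.Nodup :=
    PySem.Dict.nodup_keys_foldl_insert _ _ _ (PySem.Dict.nodup_keys_foldl_insert _ _ _ PySem.Dict.nodup_keys_empty)
  rw [PySem.Dict.items_eq_map_keys _ hnd (0, 0)]
  rw [PySem.Dict.keys_foldl_insert, PySem.Dict.keys_foldl_insert, PySem.Dict.keys_empty, PySem.Set.update_nil_left]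
  have hget : ∀ v : String,
      ((y.foldl (fun d o => d.insert o ((d.getD o (0, 0)).1, (d.getD o (0, 0)).2 + 1))
        (x.foldl (fun d o => d.insert o ((d.getD o (0, 0)).1 + 1, (d.getD o (0, 0)).2)) PySem.Dict.empty)) : PySem.Dict String (Int × Int)).getD v (0, 0)
        = ((x.count v : Int), (y.count v : Int)) := by
    intro v
    rw [getD_foldSnd, getD_foldFst]
    simp
  rw [List.map_congr_left (fun k _ => by rw [hget k])]
  rw [ccLoop_spec]
  simp only [List.nil_append, List.filter_map, List.map_map, Function.comp_def]

theorem a_eq (x y : List String) :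
    complex_compare x y =
      ((((PySem.Set.update (PySem.Set.ofList x) y).filter (fun o => !((y.count o : Int) == 0) && ((x.count o : Int) == 0))).map (fun o => (o, (y.count o : Int)))),
       (((PySem.Set.update (PySem.Set.ofList x) y).filter (fun o => ((y.count o : Int) == 0))).map (fun o => (o, (x.count o : Int)))),
       (((PySem.Set.update (PySem.Set.ofList x) y).filter (fun o => !((y.count o : Int) == 0) && !((x.count o : Int) == 0) && !((x.count o : Int) == (y.count o : Int)))).map (fun o => (o, (x.count o : Int), (y.count o : Int)))),
       (((PySem.Set.update (PySem.Set.ofList x) y).filter (fun o => !((y.count o : Int) == 0) && !((x.count o : Int) == 0) && ((x.count o : Int) == (y.count o : Int)))).map (fun o => (o, (x.count o : Int))))) := by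
  unfold complex_compare
  simp only []
  have hk1 : ((PySem.Dict.counter x : PySem.Dict String Int)).keys.Nodup := PySem.Dict.nodup_keys_counter x
  have hk2 : ((PySem.Dict.counter y : PySem.Dict String Int)).keys.Nodup := PySem.Dict.nodup_keys_counter y
  rw [diff21_eq _ _ hk1 hk2, diff12_eq _ _ hk1 hk2, inter_eq _ _ hk1 hk2, inter_eq _ _ hk1 hk2]
  have hupd : PySem.Set.update ((PySem.Dict.counter x : PySem.Dict String Int)).keys ((PySem.Dict.counter y : PySem.Dict String Int)).keys
      = PySem.Set.update (PySem.Set.ofList x) y := by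
    rw [PySem.Dict.keys_counter, PySem.Dict.keys_counter,
        PySem.Set.update_eq_append_filter, PySem.Set.update_eq_append_filter,
        PySem.Set.ofList_eq_self_of_nodup _ (PySem.Set.nodup_ofList y)]
  rw [hupd]
  have hmem2 : ∀ o : String, decide (o ∈ ((PySem.Dict.counter y : PySem.Dict String Int)).keys) = !((y.count o : Int) == 0) := by
    intro o
    rw [PySem.Dict.keys_counter]
    by_cases h : o ∈ y
    · simp [PySem.Set.mem_ofList, h, List.count_eq_zero]
    · simp [PySem.Set.mem_ofList, h, List.count_eq_zero]
  have hmem1 : ∀ o : String, decide (o ∈ ((PySem.Dict.counter x : PySem.Dict String Int)).keys) = !((x.count o : Int) == 0) := by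
    intro o
    rw [PySem.Dict.keys_counter]
    by_cases h : o ∈ x
    · simp [PySem.Set.mem_ofList, h, List.count_eq_zero]
    · simp [PySem.Set.mem_ofList, h, List.count_eq_zero]
  have hg1 : ∀ o : String, (PySem.Dict.counter x : PySem.Dict String Int).getD o 0 = (x.count o : Int) :=
    fun o => PySem.Dict.getD_counter x o
  have hg2 : ∀ o : String, (PySem.Dict.counter y : PySem.Dict String Int).getD o 0 = (y.count o : Int) :=
    fun o => PySem.Dict.getD_counter y o
  simp only [hmem1, hmem2, hg1, hg2, Bool.not_not]

theorem complex_compare_spec : Claim_equal_complex_compare := by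
  intro x y _
  unfold Spec_complex_compare
  rw [a_eq, alt_eq]
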